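-- pv_equiv track=rewrite | github.com/dark-vacuum/LIS-4061 | Encryption/toolsForSDES.py | makeLS
-- ===== SOURCE A (Python) =====
-- def makeLS(keyPermuted):
--      lsArray = []
--      keyCopy = keyPermuted
--      for i in range (1,3):
--          halfKeyLeft = keyCopy[:int(len(keyCopy)//2)]
--          halfKeyRight = keyCopy[int(len(keyCopy)//2):]
--          keyLS = halfKeyLeft[i:] + halfKeyLeft[:i]
--          keyRS = halfKeyRight[i:] + halfKeyRight[:i]
--          lsArray.append(keyLS + keyRS)
--          keyCopy = lsArray[i-1]
--      return lsArray
-- ===== SOURCE B (Python) =====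
-- def makeLS(keyPermuted):
--     half = len(keyPermuted) // 2
--     left, right = keyPermuted[:half], keyPermuted[half:]
--
--     def rot(xs, s):
--         s %= len(xs) or 1
--         return xs[s:] + xs[:s]
--
--     return [rot(left, s) + rot(right, s) for s in (1, 3)]
-- ===== Notes on version B (the rewrite author's own statement) =====
-- stated objective: simpler
-- what changed: B removes A's keyCopy accumulator that re-splits each round's output: it splits the original key once and builds both schedule entries directly by rotating the original halves by the cumulative shift amounts 1 and 3 (mod the half length).
import Mathlib
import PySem

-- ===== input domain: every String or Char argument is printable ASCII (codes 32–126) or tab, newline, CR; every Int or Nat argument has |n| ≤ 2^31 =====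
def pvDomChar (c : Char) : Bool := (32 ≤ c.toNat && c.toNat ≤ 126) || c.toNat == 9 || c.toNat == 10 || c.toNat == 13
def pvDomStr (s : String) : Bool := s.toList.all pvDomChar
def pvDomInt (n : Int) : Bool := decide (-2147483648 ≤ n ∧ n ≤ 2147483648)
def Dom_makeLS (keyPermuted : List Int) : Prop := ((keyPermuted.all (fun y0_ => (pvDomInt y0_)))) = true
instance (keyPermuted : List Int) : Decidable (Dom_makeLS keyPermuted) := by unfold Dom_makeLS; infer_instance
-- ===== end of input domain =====

-- B replaces A's accumulator (each round re-splitting the previous round's output) by a single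
-- split of the original key and direct rotations of its halves by the cumulative shifts 1 and 3
-- (mod the half length); objective: simpler.

-- ===== PORT A =====
-- literal transliteration of one loop body: state = (lsArray, keyCopy);
-- lsArray[i-1] is ported with pyGetD (the index is always in range here, so Python never raises)
def pvStepA (st : List (List Int) × List Int) (i : Int) : List (List Int) × List Int :=
  let lsArray := st.1
  let keyCopy := st.2
  let halfKeyLeft := PySem.List.slice keyCopy none (some (PySem.Int.floordiv (keyCopy.length : Int) 2))
  let halfKeyRight := PySem.List.slice keyCopy (some (PySem.Int.floordiv (keyCopy.length : Int) 2)) none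
  let keyLS := PySem.List.slice halfKeyLeft (some i) none ++ PySem.List.slice halfKeyLeft none (some i)
  let keyRS := PySem.List.slice halfKeyRight (some i) none ++ PySem.List.slice halfKeyRight none (some i)
  let lsArray' := lsArray ++ [keyLS ++ keyRS]
  (lsArray', PySem.List.pyGetD lsArray' (i - 1) [])

def makeLS (keyPermuted : List Int) : List (List Int) :=
  ((PySem.List.pyRange 1 3 1).foldl pvStepA ([], keyPermuted)).1

-- ===== PORT B =====
-- rot xs s = cyclic left rotation by s mod len(xs)  ('len(xs) or 1' guards the empty list)
def pvRot (xs : List Int) (s : Int) : List Int :=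
  let s := PySem.Int.mod s (if xs.length = 0 then 1 else (xs.length : Int))
  PySem.List.slice xs (some s) none ++ PySem.List.slice xs none (some s)

def makeLS_alt (keyPermuted : List Int) : List (List Int) :=
  let half := PySem.Int.floordiv (keyPermuted.length : Int) 2
  let left := PySem.List.slice keyPermuted none (some half)
  let right := PySem.List.slice keyPermuted (some half) none
  [(1 : Int), 3].map (fun s => pvRot left s ++ pvRot right s)

-- ===== PRECONDITION & SPEC =====
def Spec_makeLS (keyPermuted : List Int) (out : List (List Int)) : Prop := out = makeLS_alt keyPermuted
instance (keyPermuted : List Int) (out : List (List Int)) : Decidable (Spec_makeLS keyPermuted out) := by unfold Spec_makeLS; infer_instance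

-- ===== CLAIM (what is proved, stated in full; the proofs are below) =====
def Claim_equal_makeLS : Prop := ∀ (keyPermuted : List Int), Dom_makeLS keyPermuted → Spec_makeLS keyPermuted (makeLS keyPermuted)

-- ===== LEMMAS AND PROOFS =====

-- proof-side rotation in Nat form
def pvRotN (m : Nat) (xs : List Int) : List Int := xs.drop m ++ xs.take m

lemma pvRotN_length (m : Nat) (xs : List Int) : (pvRotN m xs).length = xs.length := by
  simp [pvRotN]; omega

lemma slice_pair (xs : List Int) (m : Int) (hm : 0 ≤ m) :
    PySem.List.slice xs (some m) none ++ PySem.List.slice xs none (some m)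
      = pvRotN m.toNat xs := by
  rw [PySem.List.slice_from xs hm, PySem.List.slice_to xs hm, pvRotN]

lemma floordiv_len_two (n : Nat) :
    PySem.Int.floordiv ((n : Nat) : Int) 2 = ((n / 2 : Nat) : Int) := by
  exact_mod_cast PySem.Int.floordiv_natCast n 2

lemma pvStepA_eq (A : List (List Int)) (xs : List Int) (i : Int) (hi : 0 ≤ i) :
    pvStepA (A, xs) i =
      (A ++ [pvRotN i.toNat (xs.take (xs.length / 2)) ++ pvRotN i.toNat (xs.drop (xs.length / 2))],
       PySem.List.pyGetD
         (A ++ [pvRotN i.toNat (xs.take (xs.length / 2)) ++ pvRotN i.toNat (xs.drop (xs.length / 2))])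
         (i - 1) []) := by
  unfold pvStepA
  simp only [floordiv_len_two, PySem.List.slice_to_natCast, PySem.List.slice_from_natCast,
    slice_pair _ i hi]

lemma pyGetD_singleton_zero (x d : List Int) : PySem.List.pyGetD [x] 0 d = x := by
  simp [PySem.List.pyGetD, PySem.List.pyGet?, PySem.List.pyIdx?]

-- A unfolded: first round shifts the halves of k by 1, second shifts the halves of the
-- first round's output by 2 (the output re-splits at the same index since lengths are preserved)
lemma makeLS_eq (k : List Int) :
    makeLS k = [pvRotN 1 (k.take (k.length / 2)) ++ pvRotN 1 (k.drop (k.length / 2)),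
      pvRotN 2 (pvRotN 1 (k.take (k.length / 2))) ++ pvRotN 2 (pvRotN 1 (k.drop (k.length / 2)))] := by
  have hr : PySem.List.pyRange 1 3 1 = [1, 2] := by decide
  unfold makeLS
  rw [hr]
  simp only [List.foldl]
  rw [pvStepA_eq [] k 1 (by norm_num)]
  set L1 := pvRotN (1:Int).toNat (k.take (k.length / 2)) with hL1
  set R1 := pvRotN (1:Int).toNat (k.drop (k.length / 2)) with hR1
  have h10 : (1 : Int) - 1 = 0 := by norm_num
  rw [List.nil_append, h10, pyGetD_singleton_zero]
  rw [pvStepA_eq [L1 ++ R1] (L1 ++ R1) 2 (by norm_num)]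
  have hlenL : L1.length = k.length / 2 := by
    rw [hL1, pvRotN_length]; simp; omega
  have hlen : (L1 ++ R1).length = k.length := by
    rw [List.length_append, hL1, hR1, pvRotN_length, pvRotN_length]
    simp; omega
  have htake : (L1 ++ R1).take ((L1 ++ R1).length / 2) = L1 := by
    rw [hlen, ← hlenL]; exact List.take_left
  have hdrop : (L1 ++ R1).drop ((L1 ++ R1).length / 2) = R1 := by
    rw [hlen, ← hlenL]; exact List.drop_left
  rw [htake, hdrop]
  simp [hL1, hR1]

lemma pvRot_eq (xs : List Int) (s : Nat) :
    pvRot xs (s : Int) = pvRotN (s % (if xs.length = 0 then 1 else xs.length)) xs := by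
  unfold pvRot
  split_ifs with h
  · rw [show PySem.Int.mod (s : Int) 1 = ((s % 1 : Nat) : Int) by
        exact_mod_cast PySem.Int.mod_natCast s 1]
    rw [slice_pair _ _ (by positivity)]
    simp [Nat.mod_one]
  · rw [show PySem.Int.mod (s : Int) (xs.length : Int) = ((s % xs.length : Nat) : Int) from
        PySem.Int.mod_natCast s xs.length]
    rw [slice_pair _ _ (by positivity), Int.toNat_natCast]

-- rotate by 1 (slice form) equals rotate by 1 mod length
lemma rot1_eq (xs : List Int) :
    pvRotN 1 xs = pvRotN (1 % (if xs.length = 0 then 1 else xs.length)) xs := by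
  match xs with
  | [] => norm_num [pvRotN]
  | [a] => norm_num [pvRotN]
  | a :: b :: t =>
      have h1 : 1 % (if (a :: b :: t).length = 0 then 1 else (a :: b :: t).length) = 1 := by
        simp
      rw [h1]

-- rotate by 2 after rotate by 1 (slice forms) equals rotate by 3 mod length
lemma rot2_rot1 (xs : List Int) :
    pvRotN 2 (pvRotN 1 xs) = pvRotN (3 % (if xs.length = 0 then 1 else xs.length)) xs := by
  match xs with
  | [] => norm_num [pvRotN]
  | [a] => norm_num [pvRotN]
  | [a, b] => norm_num [pvRotN]
  | [a, b, c] =>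
      have hm : 3 % (if ([a, b, c] : List Int).length = 0 then 1
            else ([a, b, c] : List Int).length) = 0 := by norm_num
      rw [hm]
      simp [pvRotN]
  | a :: b :: c :: d :: t =>
      have hm : 3 % (if (a :: b :: c :: d :: t).length = 0 then 1
            else (a :: b :: c :: d :: t).length) = 3 := by
        simp
      rw [hm]
      simp [pvRotN]

-- ===== VERDICT (by name: the statement is the Claim_ definition above) =====
theorem makeLS_spec : Claim_equal_makeLS := by
  intro k _
  unfold Spec_makeLS
  rw [makeLS_eq]
  unfold makeLS_alt
  simp only [floordiv_len_two, PySem.List.slice_to_natCast, PySem.List.slice_from_natCast,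
    List.map]
  rw [show (1 : Int) = ((1 : Nat) : Int) by norm_num,
      show (3 : Int) = ((3 : Nat) : Int) by norm_num]
  rw [pvRot_eq, pvRot_eq, pvRot_eq, pvRot_eq]
  rw [← rot1_eq, ← rot1_eq, ← rot2_rot1, ← rot2_rot1]
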